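-- pv_equiv track=rewrite | github.com/yesterdayshero/on-this-day-e-ink | src/on_this_day/selector.py | _deduplicate_topics
-- ===== SOURCE A (Python) =====
-- def _deduplicate_topics(ranked: list[dict]) -> list[dict]:
--     """Keep only the highest-scoring event per colon-prefixed topic."""
--     seen_topics: set[str] = set()
--     result: list[dict] = []
--     for event in ranked:
--         text = event.get("text", "")
--         if ": " in text:
--             topic = text.split(": ", 1)[0].strip().lower()
--             if topic in seen_topics:
--                 continue
--             seen_topics.add(topic)
--         result.append(event)
--     return result
-- ===== SOURCE B (Python) =====
-- def _deduplicate_topics(ranked: list[dict]) -> list[dict]: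
--     """Keep only the highest-scoring event per colon-prefixed topic."""
--     first_index: dict[str, int] = {}
--     for i, event in enumerate(ranked):
--         text = event.get("text", "")
--         if ": " in text:
--             topic = text.split(": ", 1)[0].strip().lower()
--             first_index.setdefault(topic, i)
--     return [
--         event
--         for i, event in enumerate(ranked)
--         if ": " not in event.get("text", "")
--         or first_index[event.get("text", "").split(": ", 1)[0].strip().lower()] == i
--     ]
-- ===== Notes on version B (the rewrite author's own statement) =====
-- stated objective: alternative
-- what changed: Replaces A's single pass with a running 'seen' set and result accumulator by a two-pass decomposition: a first-occurrence index per topic built with dict.setdefault over enumerate, then a stateless filter keeping events without ': ' and first occurrences of each topic.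
import Mathlib
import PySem

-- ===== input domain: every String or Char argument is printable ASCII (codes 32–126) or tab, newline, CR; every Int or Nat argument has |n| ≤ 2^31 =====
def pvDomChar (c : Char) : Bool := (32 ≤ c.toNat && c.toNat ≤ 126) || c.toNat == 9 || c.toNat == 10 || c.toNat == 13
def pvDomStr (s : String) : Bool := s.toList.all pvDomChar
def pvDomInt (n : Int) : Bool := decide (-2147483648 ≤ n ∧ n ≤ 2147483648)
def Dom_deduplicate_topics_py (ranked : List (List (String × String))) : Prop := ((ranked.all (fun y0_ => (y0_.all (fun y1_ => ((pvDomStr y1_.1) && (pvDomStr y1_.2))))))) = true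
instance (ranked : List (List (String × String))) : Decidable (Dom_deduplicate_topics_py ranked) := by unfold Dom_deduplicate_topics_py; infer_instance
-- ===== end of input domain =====

-- B replaces A's single pass with a running 'seen' set by two passes: a setdefault-built
-- first-occurrence index per topic, then a filter keeping non-colon events and first occurrences
-- (objective: alternative decomposition, same result).


-- ===== PORT A =====
-- text.split(": ", 1)[0].strip().lower()  (identical expression in both Pythons)
def pvTopic (text : String) : String :=
  PySem.Str.lower (PySem.Str.strip (((PySem.Str.splitMax? text ": " 1).getD []).headD ""))

def deduplicate_topics_py (ranked : List (List (String × String))) : List (List (String × String)) :=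
  (ranked.foldl
    (fun (st : PySem.Set String × List (List (String × String))) event =>
      let text := PySem.Dict.getD ⟨event⟩ "text" ""
      if PySem.Str.isIn ": " text then
        let topic := pvTopic text
        if PySem.Set.contains st.1 topic then st
        else (PySem.Set.add st.1 topic, st.2 ++ [event])
      else (st.1, st.2 ++ [event]))
    (PySem.Set.empty, [])).2

-- ===== PORT B =====
-- 'first_index[topic] == i' is ported as 'fi.get? topic == some i': exact, because the first
-- pass recorded every topic the second pass looks up (so Python's [] never raises here).
def deduplicate_topics_py_alt (ranked : List (List (String × String))) : List (List (String × String)) :=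
  let fi : PySem.Dict String Int :=
    (PySem.List.enumerate ranked).foldl
      (fun d p =>
        let text := PySem.Dict.getD ⟨p.2⟩ "text" ""
        if PySem.Str.isIn ": " text then d.setdefault (pvTopic text) p.1 else d)
      PySem.Dict.empty
  ((PySem.List.enumerate ranked).filter
    (fun p =>
      let text := PySem.Dict.getD ⟨p.2⟩ "text" ""
      !(PySem.Str.isIn ": " text) || (fi.get? (pvTopic text) == some p.1))).map (·.2)

-- ===== PRECONDITION & SPEC =====
def Spec_deduplicate_topics_py (ranked : List (List (String × String))) (out : List (List (String × String))) : Prop := out = deduplicate_topics_py_alt ranked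
instance (ranked : List (List (String × String))) (out : List (List (String × String))) : Decidable (Spec_deduplicate_topics_py ranked out) := by unfold Spec_deduplicate_topics_py; infer_instance

-- ===== CLAIM (what is proved, stated in full; the proofs are below) =====
def Claim_equal_deduplicate_topics_py : Prop := ∀ (ranked : List (List (String × String))), Dom_deduplicate_topics_py ranked → Spec_deduplicate_topics_py ranked (deduplicate_topics_py ranked)

-- ===== LEMMAS AND PROOFS =====

-- A's loop, accumulator-free, generalized over the colon test c and the topic function t.
def pvLoopA {α : Type} (c : α → Bool) (t : α → String) (seen : PySem.Set String) : List α → List α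
  | [] => []
  | e :: es =>
    if c e then
      if PySem.Set.contains seen (t e) then pvLoopA c t seen es
      else e :: pvLoopA c t (PySem.Set.add seen (t e)) es
    else e :: pvLoopA c t seen es

-- B's first pass, as structural recursion carrying the running index.
def pvBuild {α : Type} (c : α → Bool) (t : α → String) (d : PySem.Dict String Int) (n : Int) :
    List α → PySem.Dict String Int
  | [] => d
  | e :: es => pvBuild c t (if c e then d.setdefault (t e) n else d) (n + 1) es

lemma pvFoldlA_eq {α : Type} (c : α → Bool) (t : α → String) :
    ∀ (l : List α) (seen : PySem.Set String) (acc : List α),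
      (l.foldl
        (fun (st : PySem.Set String × List α) e =>
          if c e then
            if PySem.Set.contains st.1 (t e) then st
            else (PySem.Set.add st.1 (t e), st.2 ++ [e])
          else (st.1, st.2 ++ [e]))
        (seen, acc)).2 = acc ++ pvLoopA c t seen l := by
  intro l
  induction l with
  | nil => intro seen acc; simp [pvLoopA]
  | cons e es ih =>
    intro seen acc
    simp only [List.foldl_cons, pvLoopA]
    by_cases hc : c e
    · by_cases hs : PySem.Set.contains seen (t e)
      · simp only [hc, hs, reduceIte]
        rw [ih]
      · simp only [hc, hs, reduceIte]
        rw [ih]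
        simp
    · simp only [hc]
      rw [ih]
      simp

lemma pvBuild_eq_foldl {α : Type} (c : α → Bool) (t : α → String) :
    ∀ (l : List α) (d : PySem.Dict String Int) (n : Int),
      (PySem.List.enumerate l n).foldl
        (fun d' (p : Int × α) => if c p.2 then d'.setdefault (t p.2) p.1 else d') d
        = pvBuild c t d n l := by
  intro l
  induction l with
  | nil => intro d n; simp [PySem.List.enumerate, pvBuild]
  | cons e es ih =>
    intro d n
    rw [PySem.List.enumerate_cons]
    simp only [List.foldl_cons, pvBuild]
    exact ih _ _

-- keys already present keep their value through the whole build (setdefault never overwrites)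
lemma pvBuild_get?_of_contains {α : Type} (c : α → Bool) (t : α → String) :
    ∀ (l : List α) (d : PySem.Dict String Int) (n : Int) (k : String),
      d.contains k = true → (pvBuild c t d n l).get? k = d.get? k := by
  intro l
  induction l with
  | nil => intro d n k _; rfl
  | cons e es ih =>
    intro d n k hk
    simp only [pvBuild]
    by_cases hc : c e
    · simp only [hc, if_pos]
      by_cases ht : d.contains (t e)
      · rw [PySem.Dict.setdefault_of_contains d n ht]; exact ih d (n + 1) k hk
      · rw [PySem.Dict.setdefault_of_not_contains d n (by simpa using ht)]
        have hne : k ≠ t e := by intro h; rw [h] at hk; simp [hk] at ht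
        rw [ih _ _ _ (by simp [PySem.Dict.contains_insert, hk]),
            PySem.Dict.get?_insert_of_ne _ _ hne]
    · simp only [hc, Bool.false_eq_true, if_false]; exact ih d (n + 1) k hk

lemma pvSet_add_contains (s : PySem.Set String) (x k : String) :
    PySem.Set.contains (PySem.Set.add s x) k = (k == x || PySem.Set.contains s k) := by
  by_cases h : PySem.Set.contains s x
  · rw [PySem.Set.add, if_pos h]
    by_cases hk : k = x
    · subst hk
      have hm : k ∈ s := by simpa [PySem.Set.contains] using h
      simp [hm]
    · simp [hk]
  · rw [PySem.Set.add, if_neg h]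
    simp only [PySem.Set.contains, List.contains_append] at *
    by_cases hk : k = x
    · subst hk
      have hm : k ∉ s := by simpa using h
      simp [hm]
    · cases hcs : List.contains s k <;> simp [hk]

-- the main invariant: B's filter over the suffix, against the dict built from that suffix,
-- produces exactly A's loop, provided d's keys are the seen topics and d's values are < n.
lemma pvMain {α : Type} (c : α → Bool) (t : α → String) :
    ∀ (l : List α) (d : PySem.Dict String Int) (n : Int) (seen : PySem.Set String),
      (∀ k, d.contains k = PySem.Set.contains seen k) →
      (∀ k i, d.get? k = some i → i < n) →
      ((PySem.List.enumerate l n).filter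
        (fun p => !(c p.2) || ((pvBuild c t d n l).get? (t p.2) == some p.1))).map (·.2)
        = pvLoopA c t seen l := by
  intro l
  induction l with
  | nil => intro d n seen _ _; simp [PySem.List.enumerate, pvLoopA]
  | cons e es ih =>
    intro d n seen hkeys hvals
    rw [PySem.List.enumerate_cons]
    simp only [pvBuild, pvLoopA]
    by_cases hc : c e
    · simp only [hc, if_pos]
      by_cases hs : PySem.Set.contains seen (t e)
      · -- topic already seen: head is dropped, dict unchanged
        have hd : d.contains (t e) = true := by rw [hkeys]; exact hs
        rw [PySem.Dict.setdefault_of_contains d n hd]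
        obtain ⟨i, hi⟩ : ∃ i, d.get? (t e) = some i := by
          have h1 := PySem.Dict.contains_eq_isSome_get? d (t e)
          rw [hd] at h1
          exact Option.isSome_iff_exists.mp h1.symm
        have hget : (pvBuild c t d (n + 1) es).get? (t e) = some i :=
          (pvBuild_get?_of_contains c t es d (n + 1) (t e) hd).trans hi
        have hlt : i < n := hvals _ _ hi
        rw [List.filter_cons]
        have hpred : (!(c e) || ((pvBuild c t d (n + 1) es).get? (t e) == some (n : Int))) = false := by
          simp [hc, hget]; omega
        simp only [hpred, Bool.false_eq_true, if_false, hs, if_pos]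
        exact ih d (n + 1) seen hkeys (fun k i h => lt_trans (hvals k i h) (by omega))
      · -- first occurrence: head is kept, topic inserted with value n
        have hd : d.contains (t e) = false := by rw [hkeys]; simpa using hs
        rw [PySem.Dict.setdefault_of_not_contains d n hd]
        have hget : (pvBuild c t (d.insert (t e) n) (n + 1) es).get? (t e) = some n := by
          rw [pvBuild_get?_of_contains c t es _ _ _ (by simp),
              PySem.Dict.get?_insert_self]
        rw [List.filter_cons]
        have hpred : (!(c e) || ((pvBuild c t (d.insert (t e) n) (n + 1) es).get? (t e) == some (n : Int))) = true := by
          simp [hget]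
        simp only [hpred, if_pos, List.map_cons, hs, Bool.false_eq_true, if_false]
        congr 1
        apply ih
        · intro k
          rw [PySem.Dict.contains_insert, pvSet_add_contains]
          by_cases hk : k = t e <;> simp [hk, hkeys]
        · intro k i hgi
          by_cases hk : k = t e
          · subst hk; rw [PySem.Dict.get?_insert_self] at hgi
            cases hgi; omega
          · rw [PySem.Dict.get?_insert_of_ne _ _ hk] at hgi
            exact lt_trans (hvals k i hgi) (by omega)
    · -- no ": " in text: always kept, dict untouched
      have hcf : c e = false := by simpa using hc
      simp only [hcf, Bool.false_eq_true, if_false, List.filter_cons, Bool.not_false,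
        Bool.true_or, if_pos, List.map_cons]
      congr 1
      exact ih d (n + 1) seen hkeys (fun k i h => lt_trans (hvals k i h) (by omega))

-- ===== VERDICT (by name: the statement is the Claim_ definition above) =====
theorem deduplicate_topics_py_spec : Claim_equal_deduplicate_topics_py := by
  intro ranked _
  unfold Spec_deduplicate_topics_py deduplicate_topics_py deduplicate_topics_py_alt
  set c : List (String × String) → Bool :=
    fun e => PySem.Str.isIn ": " (PySem.Dict.getD ⟨e⟩ "text" "") with hc
  set t : List (String × String) → String :=
    fun e => pvTopic (PySem.Dict.getD ⟨e⟩ "text" "") with ht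
  rw [pvFoldlA_eq c t ranked PySem.Set.empty []]
  rw [pvBuild_eq_foldl c t ranked PySem.Dict.empty 0]
  rw [pvMain c t ranked PySem.Dict.empty 0 PySem.Set.empty (fun k => rfl) (fun k i h => by simp [PySem.Dict.get?, PySem.Dict.empty] at h)]
  simp
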